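-- pv_equiv track=rewrite | github.com/kumatheworld/CtCI | exercise16_21.py | solve
-- ===== SOURCE A (Python) =====
-- from bisect import bisect_left
-- from typing import Optional
--
-- def solve(a: list[int], b: list[int]) -> Optional[tuple[int, int]]:
--     sa = sum(a)
--     sb = sum(b)
--     diff = sb - sa
--     if diff % 2:
--         return None
--
--     h = diff // 2
--     l = sorted(a)
--     m = sorted(b)
--     lo = 0
--     for x in l:
--         y = x + h
--         idx = bisect_left(m, y, lo)
--         try:
--             if m[idx] == y:
--                 return x, y
--         except IndexError:
--             return None
--         lo = idx
-- ===== SOURCE B (Python) =====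
-- def solve(a, b):
--     diff = sum(b) - sum(a)
--     if diff % 2:
--         return None
--     h = diff // 2
--     targets = set(b)
--     best = None
--     for x in a:
--         if (best is None or x < best) and x + h in targets:
--             best = x
--     if best is None:
--         return None
--     return best, best + h
-- ===== Notes on version B (the rewrite author's own statement) =====
-- stated objective: alternative
-- what changed: Replaced A's sort-both-lists plus bisect_left merge with a moving lower bound (and try/except control flow) by one unsorted pass over a that keeps the minimum x whose x+h lies in a hash set built once from b.
import Mathlib
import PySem

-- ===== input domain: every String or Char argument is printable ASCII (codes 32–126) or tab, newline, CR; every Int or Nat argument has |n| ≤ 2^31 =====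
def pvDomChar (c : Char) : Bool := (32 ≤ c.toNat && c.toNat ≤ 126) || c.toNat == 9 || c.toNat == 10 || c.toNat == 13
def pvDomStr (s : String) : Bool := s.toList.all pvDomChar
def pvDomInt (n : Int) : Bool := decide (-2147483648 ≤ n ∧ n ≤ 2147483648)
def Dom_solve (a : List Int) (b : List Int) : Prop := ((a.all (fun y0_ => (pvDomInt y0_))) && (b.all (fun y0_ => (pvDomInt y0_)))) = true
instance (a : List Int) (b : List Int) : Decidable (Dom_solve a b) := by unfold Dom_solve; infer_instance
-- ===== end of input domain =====

-- B replaces A's sort-both-lists + bisect-with-moving-lower-bound merge by a single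
-- unsorted pass over a that tracks the minimum x with x+h in a set built from b.

-- ===== PORT A =====
-- A's loop: for x in l (sorted a), bisect into m (sorted b) from the moving bound lo;
-- bisect_left(m, y, lo) is ported exactly as lo + bisectLeft (m.drop lo) y (the binary
-- search on indices [lo, len) performs the same comparisons as one on m[lo:] shifted by lo).
-- m[idx] with try/except IndexError becomes m[idx]? with the none branch returning none.
def solveLoopA (m : List Int) (h : Int) : List Int → Nat → Option (Int × Int)
  | [], _ => none
  | x :: xs, lo =>
    let y := x + h
    let idx := lo + PySem.List.bisectLeft (m.drop lo) y
    match m[idx]? with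
    | some v => if v = y then some (x, y) else solveLoopA m h xs idx
    | none => none

def solve (a : List Int) (b : List Int) : Option (Int × Int) :=
  let sa := a.sum
  let sb := b.sum
  let diff := sb - sa
  if PySem.Int.mod diff 2 ≠ 0 then none
  else
    solveLoopA (PySem.List.sorted b (fun x => x) false) (PySem.Int.floordiv diff 2)
      (PySem.List.sorted a (fun x => x) false) 0

-- ===== PORT B =====
-- loop body: if (best is None or x < best) and x + h in targets: best = x
def bestStep (t : PySem.Set Int) (h : Int) (best : Option Int) (x : Int) : Option Int :=
  if ((match best with | none => true | some bx => decide (x < bx)) && decide ((x + h) ∈ t)) then some x else best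

def solve_alt (a : List Int) (b : List Int) : Option (Int × Int) :=
  let diff := b.sum - a.sum
  if PySem.Int.mod diff 2 ≠ 0 then none
  else
    let h := PySem.Int.floordiv diff 2
    let t := PySem.Set.ofList b
    match a.foldl (bestStep t h) none with
    | none => none
    | some x => some (x, x + h)

-- ===== PRECONDITION & SPEC =====
def Spec_solve (a : List Int) (b : List Int) (out : Option (Int × Int)) : Prop := out = solve_alt a b
instance (a : List Int) (b : List Int) (out : Option (Int × Int)) : Decidable (Spec_solve a b out) := by unfold Spec_solve; infer_instance

-- ===== CLAIM (what is proved, stated in full; the proofs are below) =====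
def Claim_equal_solve : Prop := ∀ (a : List Int) (b : List Int), Dom_solve a b → Spec_solve a b (solve a b)

-- ===== LEMMAS AND PROOFS =====

-- proof-side helper: the first x (in list order) with x + h ∈ b, paired with x + h
def findFirst (b : List Int) (h : Int) : List Int → Option (Int × Int)
  | [] => none
  | x :: xs => if (x + h) ∈ b then some (x, x + h) else findFirst b h xs

theorem findFirst_none (b : List Int) (h : Int) (l : List Int)
    (hnone : ∀ x ∈ l, x + h ∉ b) : findFirst b h l = none := by
  induction l with
  | nil => rfl
  | cons x xs ih =>
    simp only [findFirst, if_neg (hnone x (List.mem_cons_self ..))]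
    exact ih fun x' hx' => hnone x' (List.mem_cons_of_mem _ hx')

-- A's merge loop equals the naive first-match scan, given m sorted with b's elements
theorem loopA_eq_findFirst (b : List Int) (h : Int) (m : List Int)
    (hm : m.Pairwise (· ≤ ·)) (hmem : ∀ t : Int, t ∈ m ↔ t ∈ b) :
    ∀ (l : List Int) (lo : Nat), l.Pairwise (· ≤ ·) →
      (∀ z ∈ m.take lo, ∀ x ∈ l, z < x + h) →
      solveLoopA m h l lo = findFirst b h l := by
  intro l
  induction l with
  | nil => intro lo _ _; rfl
  | cons x xs ih =>
    intro lo hl hlo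
    have hxle : ∀ x' ∈ xs, x ≤ x' := fun x' hx' => (List.pairwise_cons.mp hl).1 x' hx'
    have hxs : xs.Pairwise (· ≤ ·) := (List.pairwise_cons.mp hl).2
    set y := x + h with hy
    have hdp : (m.drop lo).Pairwise (· ≤ ·) := hm.sublist (List.drop_sublist lo m)
    obtain ⟨hk1, hk2, hk3⟩ := PySem.List.bisectLeft_spec (m.drop lo) y hdp
    set k := PySem.List.bisectLeft (m.drop lo) y with hkdef
    set idx := lo + k with hidx
    -- every element of m before index idx is < y
    have fact1 : ∀ j : Nat, j < idx → (hj : j < m.length) → m[j] < y := by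
      intro j hjidx hj
      by_cases hjlo : j < lo
      · have hmem' : m[j] ∈ m.take lo := by
          rw [List.mem_take_iff_getElem]
          exact ⟨j, by omega, by simp⟩
        exact hlo _ hmem' x (List.mem_cons_self ..)
      · have hj' : j - lo < (m.drop lo).length := by simp [List.length_drop]; omega
        have h2 := hk2 (j - lo) hj' (by omega)
        have h? : (m.drop lo)[j - lo]? = m[j]? := by
          rw [List.getElem?_drop]
          congr 1
          omega
        rw [List.getElem?_eq_getElem hj', List.getElem?_eq_getElem hj] at h?
        have hEq : (m.drop lo)[j - lo]'hj' = m[j]'hj := by simpa using h?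
        exact hEq ▸ h2
    have fact2 : (hi : idx < m.length) → y ≤ m[idx] := by
      intro hi
      have hk' : k < (m.drop lo).length := by simp [List.length_drop]; omega
      have h3 := hk3 k hk' le_rfl
      have h? : (m.drop lo)[k]? = m[idx]? := by rw [List.getElem?_drop, hidx]
      rw [List.getElem?_eq_getElem hk', List.getElem?_eq_getElem hi] at h?
      have hEq : (m.drop lo)[k]'hk' = m[idx]'hi := by simpa using h?
      exact hEq ▸ h3
    by_cases hymem : y ∈ m
    · -- A finds y at idx; the scan of b finds it too
      obtain ⟨j, hj, hjy⟩ := List.mem_iff_getElem.mp hymem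
      have hjidx : ¬ j < idx := fun hlt => absurd (hjy ▸ fact1 j hlt hj) (lt_irrefl y)
      have hi : idx < m.length := by omega
      have hylev : y ≤ m[idx] := fact2 hi
      have hvle : m[idx] ≤ y := by
        rcases Nat.lt_or_ge idx j with hlt | hge
        · exact hjy ▸ List.pairwise_iff_getElem.mp hm idx j hi hj hlt
        · have : idx = j := by omega
          simp [this, hjy]
      have hveq : m[idx] = y := le_antisymm hvle hylev
      have hbmem : y ∈ b := (hmem y).mp hymem
      simp only [solveLoopA, findFirst, ← hy, ← hkdef, ← hidx, List.getElem?_eq_getElem hi,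
        hveq, if_pos hbmem]
      simp
    · -- y is not in m (hence not in b)
      have hnb : y ∉ b := fun hb => hymem ((hmem y).mpr hb)
      by_cases hi : idx < m.length
      · -- m[idx] exists but differs from y: both loops continue
        have hne : ¬ m[idx] = y := fun hEq => hymem (hEq ▸ List.getElem_mem hi)
        have hstep : solveLoopA m h (x :: xs) lo = solveLoopA m h xs idx := by
          simp only [solveLoopA, ← hy, ← hkdef, ← hidx, List.getElem?_eq_getElem hi,
            if_neg hne]
        rw [hstep]
        have hstepB : findFirst b h (x :: xs) = findFirst b h xs := by
          simp only [findFirst, ← hy, if_neg hnb]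
        rw [hstepB]
        exact ih idx hxs (by
          intro z hz x' hx'
          obtain ⟨j, hjlt, hjz⟩ := List.mem_take_iff_getElem.mp hz
          have hzy : z < y := hjz ▸ fact1 j (by omega) (by omega)
          have := hxle x' hx'
          omega)
      · -- idx past the end: A returns None; no later x' can match either
        have hnone : m[idx]? = none := List.getElem?_eq_none_iff.mpr (by omega)
        have hA : solveLoopA m h (x :: xs) lo = none := by
          simp only [solveLoopA, ← hy, ← hkdef, ← hidx, hnone]
        rw [hA]
        refine (findFirst_none b h (x :: xs) ?_).symm
        intro x' hx' hbmem
        have hmmem : x' + h ∈ m := (hmem _).mpr hbmem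
        obtain ⟨j, hj, hjv⟩ := List.mem_iff_getElem.mp hmmem
        have : m[j] < y := fact1 j (by omega) hj
        have hxx' : x ≤ x' := by
          rcases List.mem_cons.mp hx' with hEq | hmem'
          · omega
          · exact hxle x' hmem'
        omega

-- the first-match scan is find? followed by pairing
theorem findFirst_eq_find? (b : List Int) (h : Int) (l : List Int) :
    findFirst b h l = (l.find? (fun x => decide ((x + h) ∈ b))).map (fun x => (x, x + h)) := by
  induction l with
  | nil => rfl
  | cons x xs ih =>
    by_cases hx : (x + h) ∈ b
    · simp [findFirst, hx]
    · simp only [findFirst, if_neg hx, ih, List.find?_cons]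
      simp [hx]

-- min-merge on Option is associative
theorem merge_min_assoc (o1 o2 o3 : Option Int) :
    Option.merge min (Option.merge min o1 o2) o3 = Option.merge min o1 (Option.merge min o2 o3) := by
  cases o1 <;> cases o2 <;> cases o3 <;> simp [Option.merge, min_assoc]

-- B's loop body is a min-merge against the matches
theorem bestStep_merge (t : PySem.Set Int) (h : Int) (best : Option Int) (x : Int) :
    bestStep t h best x =
      if (x + h) ∈ t then Option.merge min best (some x) else best := by
  unfold bestStep
  by_cases hm : (x + h) ∈ t
  · cases best with
    | none => simp [hm, Option.merge]
    | some bx =>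
      by_cases hlt : x < bx
      · simp [hm, hlt, Option.merge, min_eq_right (le_of_lt hlt)]
      · simp [hm, hlt, Option.merge, min_eq_left (by omega : bx ≤ x)]
  · cases best <;> simp [hm]

-- B's fold computes the minimum of the matching elements
theorem foldl_bestStep (t : PySem.Set Int) (h : Int) :
    ∀ (a : List Int) (best : Option Int),
      a.foldl (bestStep t h) best =
        Option.merge min best ((a.filter (fun x => decide ((x + h) ∈ t))).min?) := by
  intro a
  induction a with
  | nil => intro best; cases best <;> simp [Option.merge]
  | cons x xs ih =>
    intro best
    rw [List.foldl_cons, ih, bestStep_merge]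
    by_cases hx : (x + h) ∈ t
    · rw [if_pos hx, List.filter_cons_of_pos (by simpa using hx), merge_min_assoc]
      congr 1
      rw [List.min?_cons]
      cases hmin : (xs.filter (fun x => decide ((x + h) ∈ t))).min? <;>
        simp [Option.merge]
    · rw [if_neg hx, List.filter_cons_of_neg (by simpa using hx)]

-- min? is invariant under permutation
theorem min?_perm (l1 l2 : List Int) (hp : l1.Perm l2) : l1.min? = l2.min? := by
  cases h1 : l1.min? with
  | none =>
    have h0 : l1 = [] := List.min?_eq_none_iff.mp h1
    have h2 : l2 = [] := ((h0 ▸ hp).symm).eq_nil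
    simp [h2]
  | some v =>
    rw [List.min?_eq_some_iff] at h1
    exact (List.min?_eq_some_iff.mpr
      ⟨hp.mem_iff.mp h1.1, fun z hz => h1.2 z (hp.mem_iff.mpr hz)⟩).symm

-- on a ≤-sorted list, min? is the head
theorem min?_eq_head?_of_sorted (l : List Int) (hl : l.Pairwise (· ≤ ·)) :
    l.min? = l.head? := by
  cases l with
  | nil => rfl
  | cons x xs =>
    have hle : ∀ y ∈ xs, x ≤ y := fun y hy => (List.pairwise_cons.mp hl).1 y hy
    rw [List.min?_cons]
    cases hmin : xs.min? with
    | none => rfl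
    | some m =>
      have hm : m ∈ xs := (List.min?_eq_some_iff.mp hmin).1
      simp [min_eq_left (hle m hm)]

-- ===== VERDICT (by name: the statement is the Claim_ definition above) =====
theorem solve_spec : Claim_equal_solve := by
  intro a b _
  unfold Spec_solve solve solve_alt
  simp only []
  split_ifs with hmod
  · rfl
  · set h := PySem.Int.floordiv (b.sum - a.sum) 2
    set l := PySem.List.sorted a (fun x => x) false with hldef
    set P : Int → Bool := fun x => decide ((x + h) ∈ b) with hP
    have hlp : l.Pairwise (· ≤ ·) := by
      simpa using PySem.List.sorted_pairwise a (fun x => x)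
    -- A's side: merge loop = first match on sorted a = find? then pair
    have hA : solveLoopA (PySem.List.sorted b (fun x => x) false) h l 0
        = (l.find? P).map (fun x => (x, x + h)) := by
      rw [loopA_eq_findFirst b h _ (by simpa using PySem.List.sorted_pairwise b (fun x => x))
        (fun t => PySem.List.mem_sorted b (fun x => x) false t) l 0 hlp (by simp),
        findFirst_eq_find?]
    rw [hA]
    -- B's side: fold = min of matches
    rw [foldl_bestStep]
    have hfil : (a.filter (fun x => decide ((x + h) ∈ PySem.Set.ofList b))) = a.filter P := by
      exact List.filter_congr (fun x _ => by simp [hP, PySem.Set.mem_ofList])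
    rw [hfil]
    have hperm : (a.filter P).Perm (l.filter P) :=
      ((PySem.List.sorted_perm a (fun x => x) false).filter P).symm
    rw [min?_perm _ _ hperm,
        min?_eq_head?_of_sorted _ (hlp.filter P), List.head?_filter]
    cases hf : l.find? P <;> simp [Option.merge]
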